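-- pv_equiv track=rewrite | github.com/dolonet/wagstaff-chebyshev | scripts/chebyshev_test.py | chebyshev_test
-- ===== SOURCE A (Python) =====
-- def chebyshev_test(p):
--     """Return True if W_p passes the Chebyshev test (probable prime)."""
--     N = (pow(2, p) + 1) // 3
--
--     # Work in Z[sqrt(2)]/(N), elements are pairs (a, b) for a + b*sqrt(2).
--     def mul(x, y):
--         a, b = x
--         c, d = y
--         return ((a * c + 2 * b * d) % N, (a * d + b * c) % N)
--
--     # Compute omega_3^{(N+1)/2} mod N by binary exponentiation.
--     exp = (N + 1) // 2
--     result = (1, 0)   # identity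
--     base = (3, 2)     # omega_3 = 3 + 2*sqrt(2)
--     while exp > 0:
--         if exp & 1:
--             result = mul(result, base)
--         base = mul(base, base)
--         exp >>= 1
--
--     return result == (N - 1, 0)
-- ===== SOURCE B (Python) =====
-- def chebyshev_test(p):
--     """Return True if W_p passes the Chebyshev test (probable prime)."""
--     N = (2 ** p + 1) // 3
--
--     # Z[sqrt(2)]/(N): elements (a, b) stand for a + b*sqrt(2).
--     def mul(x, y):
--         a, b = x
--         c, d = y
--         return ((a * c + 2 * b * d) % N, (a * d + b * c) % N)
--
--     # Left-to-right (MSB-first) square-and-multiply: square the accumulator,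
--     # multiply in the fixed base omega_3 = (3, 2) on set bits.
--     e = (N + 1) // 2
--     bits = []
--     while e > 0:
--         bits.append(e & 1)
--         e >>= 1
--     result = (1, 0)
--     for bit in reversed(bits):
--         result = mul(result, result)
--         if bit:
--             result = mul(result, (3, 2))
--     return result == (N - 1, 0)
-- ===== Notes on version B (the rewrite author's own statement) =====
-- stated objective: alternative
-- what changed: Replaces A's right-to-left binary exponentiation (which carries and repeatedly squares the base while multiplying into the result on low bits) with left-to-right square-and-multiply: the bits of the exponent are extracted once and processed MSB-first, squaring the accumulator and multiplying in the fixed base (3,2) on set bits; the base is never squared.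
import Mathlib
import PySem

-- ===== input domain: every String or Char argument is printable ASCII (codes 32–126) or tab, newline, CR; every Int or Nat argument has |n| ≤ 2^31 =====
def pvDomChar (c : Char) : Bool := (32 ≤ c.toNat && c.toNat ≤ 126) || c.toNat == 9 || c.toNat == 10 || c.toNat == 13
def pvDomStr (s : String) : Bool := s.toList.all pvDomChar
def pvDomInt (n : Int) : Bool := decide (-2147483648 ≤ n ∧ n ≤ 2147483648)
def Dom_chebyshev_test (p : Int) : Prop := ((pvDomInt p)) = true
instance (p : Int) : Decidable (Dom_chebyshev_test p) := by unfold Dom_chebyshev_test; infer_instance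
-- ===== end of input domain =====

-- B replaces A's right-to-left (LSB-first, base-squaring) binary exponentiation by
-- left-to-right (MSB-first, accumulator-squaring) square-and-multiply with a fixed base;
-- objective: alternative algorithm of the same cost.

-- ===== PORT A =====
-- A's nested helper mul: multiplication in Z[sqrt(2)]/(N), pairs (a,b) = a + b*sqrt(2).
def pvMulA (N : Int) (x y : Int × Int) : Int × Int :=
  (PySem.Int.mod (x.1 * y.1 + 2 * x.2 * y.2) N, PySem.Int.mod (x.1 * y.2 + x.2 * y.1) N)

-- A's while-loop: result updated on the low bit, base squared, exponent halved.
def chebLoopA (N : Int) (e : Nat) (result base : Int × Int) : Int × Int :=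
  if e = 0 then result
  else chebLoopA N (e / 2)
         (if e % 2 = 1 then pvMulA N result base else result)
         (pvMulA N base base)
termination_by e
decreasing_by simp_wf; omega

def chebyshev_test (p : Int) : Bool :=
  -- For p < 0 Python's pow(2, p) is a float < 1, so N = (pow(2,p)+1)//3 is the float 0.0,
  -- the loop body never runs and the final comparison is False: exact as 'N := 0' here.
  let N : Int := if 0 ≤ p then PySem.Int.floordiv (2 ^ p.toNat + 1) 3 else 0
  let exp : Int := PySem.Int.floordiv (N + 1) 2
  chebLoopA N exp.toNat (1, 0) (3, 2) == (N - 1, 0)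

-- ===== PORT B =====
-- B's nested helper mul (same ring representation as A's).
def pvMulB (N : Int) (x y : Int × Int) : Int × Int :=
  (PySem.Int.mod (x.1 * y.1 + 2 * x.2 * y.2) N, PySem.Int.mod (x.1 * y.2 + x.2 * y.1) N)

-- B's bit-extraction while-loop: the bits of e, least significant first.
def pvBits (e : Nat) : List Nat :=
  if e = 0 then [] else e % 2 :: pvBits (e / 2)
termination_by e
decreasing_by simp_wf; omega

-- B's for-loop body: square the accumulator, multiply in the fixed base on a set bit.
def pvStepB (N : Int) (r : Int × Int) (bit : Nat) : Int × Int :=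
  let r2 := pvMulB N r r
  if bit = 1 then pvMulB N r2 (3, 2) else r2

def chebyshev_test_alt (p : Int) : Bool :=
  let N : Int := if 0 ≤ p then PySem.Int.floordiv (2 ^ p.toNat + 1) 3 else 0
  let e : Int := PySem.Int.floordiv (N + 1) 2
  ((pvBits e.toNat).reverse.foldl (pvStepB N) (1, 0)) == (N - 1, 0)

-- ===== PRECONDITION & SPEC =====
def Spec_chebyshev_test (p : Int) (out : Bool) : Prop := out = chebyshev_test_alt p
instance (p : Int) (out : Bool) : Decidable (Spec_chebyshev_test p out) := by unfold Spec_chebyshev_test; infer_instance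

-- ===== CLAIM (what is proved, stated in full; the proofs are below) =====
def Claim_equal_chebyshev_test : Prop := ∀ (p : Int), Dom_chebyshev_test p → Spec_chebyshev_test p (chebyshev_test p)

-- ===== LEMMAS AND PROOFS =====

-- Congruence of a pair with an element of ℤ√2, componentwise mod N.
def PVCong (N : Int) (x : Int × Int) (z : Zsqrtd 2) : Prop :=
  x.1 ≡ z.re [ZMOD N] ∧ x.2 ≡ z.im [ZMOD N]

theorem pvMod_cong (a N : Int) : PySem.Int.mod a N ≡ a [ZMOD N] := by
  rw [Int.modEq_iff_dvd]
  exact ⟨PySem.Int.floordiv a N, by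
    have h := PySem.Int.floordiv_mul_add_mod a N; linarith⟩

theorem pvCong_mul {N : Int} {x y : Int × Int} {z w : Zsqrtd 2}
    (hx : PVCong N x z) (hy : PVCong N y w) : PVCong N (pvMulA N x y) (z * w) := by
  constructor
  · refine (pvMod_cong _ _).trans ?_
    have : (z * w).re = z.re * w.re + 2 * (z.im * w.im) := by
      simp [Zsqrtd.re_mul]; ring
    rw [this, show (2:Int) * x.2 * y.2 = 2 * (x.2 * y.2) by ring]
    exact (hx.1.mul hy.1).add (Int.ModEq.mul_left 2 (hx.2.mul hy.2))
  · refine (pvMod_cong _ _).trans ?_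
    rw [show (z * w).im = z.re * w.im + z.im * w.re from Zsqrtd.im_mul z w]
    exact (hx.1.mul hy.2).add (hx.2.mul hy.1)

theorem pvMulB_eq : pvMulB = pvMulA := rfl

def pvOmega : Zsqrtd 2 := ⟨3, 2⟩

theorem pvCong_refl (N a b : Int) : PVCong N (a, b) ⟨a, b⟩ :=
  ⟨Int.ModEq.refl _, Int.ModEq.refl _⟩

theorem pvCong_of_eq {N : Int} {x : Int × Int} {z w : Zsqrtd 2}
    (h : PVCong N x z) (hzw : z = w) : PVCong N x w := hzw ▸ h

-- A's loop computes z * w^e (mod N) when result ≡ z and base ≡ w.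
theorem chebLoopA_cong (N : Int) (e : Nat) :
    ∀ (r b : Int × Int) (z w : Zsqrtd 2), PVCong N r z → PVCong N b w →
      PVCong N (chebLoopA N e r b) (z * w ^ e) := by
  induction e using Nat.strong_induction_on with
  | _ e IH =>
    intro r b z w hr hb
    rw [chebLoopA]
    by_cases h0 : e = 0
    · simpa [h0] using hr
    · simp only [h0, if_neg, if_false]
      have hb2 : PVCong N (pvMulA N b b) (w ^ 2) :=
        pvCong_of_eq (pvCong_mul hb hb) (sq w).symm
      have hr' : PVCong N (if e % 2 = 1 then pvMulA N r b else r) (z * w ^ (e % 2)) := by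
        by_cases hodd : e % 2 = 1
        · simpa [hodd] using pvCong_mul hr hb
        · have : e % 2 = 0 := by omega
          simpa [hodd, this] using hr
      have := IH (e / 2) (by omega) _ _ _ _ hr' hb2
      refine pvCong_of_eq this ?_
      rw [← pow_mul, mul_assoc, ← pow_add]
      have he2 : e % 2 + 2 * (e / 2) = e := by omega
      rw [he2]

-- value of an MSB-first bit list
def pvVal : List Nat → Nat
  | [] => 0
  | b :: t => b * 2 ^ t.length + pvVal t

theorem pvCong_omega (N : Int) : PVCong N ((3, 2) : Int × Int) pvOmega :=
  pvCong_refl N 3 2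

-- B's fold computes z^(2^|L|) * ω^(val L) (mod N).
theorem foldlB_cong (N : Int) (L : List Nat) (hL : ∀ b ∈ L, b = 0 ∨ b = 1) :
    ∀ (r : Int × Int) (z : Zsqrtd 2), PVCong N r z →
      PVCong N (L.foldl (pvStepB N) r) (z ^ (2 ^ L.length) * pvOmega ^ pvVal L) := by
  induction L with
  | nil => intro r z hr; simpa [pvVal] using hr
  | cons b t IH =>
    intro r z hr
    have hstep : PVCong N (pvStepB N r b) (z ^ 2 * pvOmega ^ b) := by
      have hb := hL b (List.mem_cons_self ..)
      unfold pvStepB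
      rw [pvMulB_eq]
      rcases hb with hb | hb
      · subst hb
        simpa [sq] using pvCong_of_eq (pvCong_mul hr hr) rfl
      · subst hb
        simp only [if_pos rfl]
        refine pvCong_of_eq (pvCong_mul (pvCong_mul hr hr) (pvCong_omega N)) ?_
        rw [sq, pow_one]
      -- note: bits are always 0 or 1 here
    have := IH (fun c hc => hL c (List.mem_cons_of_mem _ hc)) _ _ hstep
    refine pvCong_of_eq (by simpa [List.foldl] using this) ?_
    rw [mul_pow, ← pow_mul, ← pow_mul, mul_assoc, ← pow_add]
    have h1 : 2 * 2 ^ t.length = 2 ^ (b :: t).length := by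
      rw [List.length_cons, pow_succ]; ring
    have h2 : b * 2 ^ t.length + pvVal t = pvVal (b :: t) := rfl
    rw [h1, h2]

theorem pvVal_append (L : List Nat) (b : Nat) : pvVal (L ++ [b]) = 2 * pvVal L + b := by
  induction L with
  | nil => simp [pvVal]
  | cons x t IH =>
    simp only [List.cons_append, pvVal, IH, List.length_append, List.length_cons,
      List.length_nil]
    ring

theorem pvBits_mem (e : Nat) : ∀ b ∈ pvBits e, b = 0 ∨ b = 1 := by
  induction e using Nat.strong_induction_on with
  | _ e IH =>
    intro b hb
    rw [pvBits] at hb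
    by_cases h0 : e = 0
    · simp [h0] at hb
    · simp only [h0, if_neg, if_false, List.mem_cons] at hb
      rcases hb with hb | hb
      · omega
      · exact IH (e / 2) (by omega) b hb

theorem pvVal_reverse_bits (e : Nat) : pvVal (pvBits e).reverse = e := by
  induction e using Nat.strong_induction_on with
  | _ e IH =>
    rw [pvBits]
    by_cases h0 : e = 0
    · simp [h0, pvVal]
    · simp only [h0, if_neg, if_false, List.reverse_cons]
      rw [pvVal_append, IH (e / 2) (by omega)]
      omega

-- reducedness: both loops return componentwise-reduced pairs once N > 0 and work happened
def PVRed (N : Int) (x : Int × Int) : Prop := 0 ≤ x.1 ∧ x.1 < N ∧ 0 ≤ x.2 ∧ x.2 < N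

theorem pvRed_mul {N : Int} (hN : 0 < N) (x y : Int × Int) : PVRed N (pvMulA N x y) := by
  unfold pvMulA PVRed
  rw [PySem.Int.mod_eq_emod_of_pos hN, PySem.Int.mod_eq_emod_of_pos hN]
  exact ⟨Int.emod_nonneg _ (by omega), Int.emod_lt_of_pos _ hN,
    Int.emod_nonneg _ (by omega), Int.emod_lt_of_pos _ hN⟩

theorem pvRed_step {N : Int} (hN : 0 < N) (r : Int × Int) (b : Nat) :
    PVRed N (pvStepB N r b) := by
  unfold pvStepB
  rw [pvMulB_eq]
  split <;> exact pvRed_mul hN ..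

theorem pvRed_foldl {N : Int} (hN : 0 < N) (L : List Nat) (hL : L ≠ []) :
    ∀ r, PVRed N (L.foldl (pvStepB N) r) := by
  induction L with
  | nil => exact absurd rfl hL
  | cons b t IH =>
    intro r
    by_cases ht : t = []
    · subst ht; simpa using pvRed_step hN r b
    · simpa using IH ht (pvStepB N r b)

theorem pvRed_loopA {N : Int} (hN : 0 < N) (e : Nat) :
    ∀ r b, 0 < e → PVRed N (chebLoopA N e r b) := by
  induction e using Nat.strong_induction_on with
  | _ e IH =>
    intro r b he
    rw [chebLoopA]
    simp only [show ¬(e = 0) by omega, if_neg, if_false]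
    by_cases h1 : e / 2 = 0
    · have : e = 1 := by omega
      subst this
      rw [chebLoopA]
      simpa using pvRed_mul hN ..
    · exact IH (e / 2) (by omega) _ _ (by omega)

theorem pvRed_cong_eq {N : Int} (hN : 0 < N) {x y : Int × Int} {z : Zsqrtd 2}
    (hx : PVRed N x) (hy : PVRed N y) (cx : PVCong N x z) (cy : PVCong N y z) : x = y := by
  obtain ⟨hx1, hx2, hx3, hx4⟩ := hx
  obtain ⟨hy1, hy2, hy3, hy4⟩ := hy
  have h1 : x.1 % N = y.1 % N := cx.1.trans cy.1.symm
  have h2 : x.2 % N = y.2 % N := cx.2.trans cy.2.symm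
  rw [Int.emod_eq_of_lt hx1 hx2, Int.emod_eq_of_lt hy1 hy2] at h1
  rw [Int.emod_eq_of_lt hx3 hx4, Int.emod_eq_of_lt hy3 hy4] at h2
  exact Prod.ext h1 h2

theorem pvBits_ne_nil {e : Nat} (he : 0 < e) : (pvBits e).reverse ≠ [] := by
  rw [pvBits]
  simp [show ¬(e = 0) by omega]

-- core equality of the two loop results
theorem pvCore (N : Int) (e : Nat) (h : 0 < N ∨ e = 0) :
    chebLoopA N e (1, 0) (3, 2) = (pvBits e).reverse.foldl (pvStepB N) (1, 0) := by
  by_cases he : e = 0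
  · subst he
    rw [chebLoopA, pvBits]
    simp
  · have hN : 0 < N := by tauto
    have hone : PVCong N ((1, 0) : Int × Int) 1 := by
      refine pvCong_of_eq (pvCong_refl N 1 0) ?_
      ext <;> simp
    have hA : PVCong N (chebLoopA N e (1, 0) (3, 2)) (pvOmega ^ e) := by
      have := chebLoopA_cong N e (1, 0) (3, 2) 1 pvOmega hone (pvCong_omega N)
      exact pvCong_of_eq this (one_mul _)
    have hB : PVCong N ((pvBits e).reverse.foldl (pvStepB N) (1, 0)) (pvOmega ^ e) := by
      have hmem : ∀ b ∈ (pvBits e).reverse, b = 0 ∨ b = 1 := by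
        intro b hb
        exact pvBits_mem e b (List.mem_reverse.mp hb)
      have := foldlB_cong N (pvBits e).reverse hmem (1, 0) 1 hone
      refine pvCong_of_eq this ?_
      rw [one_pow, one_mul, pvVal_reverse_bits]
    exact pvRed_cong_eq hN
      (pvRed_loopA hN e (1, 0) (3, 2) (by omega))
      (pvRed_foldl hN _ (pvBits_ne_nil (by omega)) (1, 0))
      hA hB

theorem pvMain (N : Int) :
    (chebLoopA N (PySem.Int.floordiv (N + 1) 2).toNat (1, 0) (3, 2) == (N - 1, 0))
      = ((pvBits (PySem.Int.floordiv (N + 1) 2).toNat).reverse.foldl (pvStepB N) (1, 0)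
          == (N - 1, 0)) := by
  have h : 0 < N ∨ (PySem.Int.floordiv (N + 1) 2).toNat = 0 := by
    by_cases hN : 0 < N
    · exact Or.inl hN
    · right
      rw [PySem.Int.floordiv_eq_ediv_of_pos (by omega)]
      omega
  rw [pvCore N _ h]

-- ===== VERDICT (by name: the statement is the Claim_ definition above) =====
theorem chebyshev_test_spec : Claim_equal_chebyshev_test := by
  intro p _
  unfold Spec_chebyshev_test chebyshev_test chebyshev_test_alt
  exact pvMain _
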